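-- pv_equiv track=rewrite | github.com/anishkumar89/demo | test.py | generate_dates
-- ===== SOURCE A (Python) =====
-- def generate_dates(start_year, start_month, num_values, periodicity):
--     dates = []
--     for i in range(num_values):
--         if periodicity == 12:  # Monthly
--             month = (start_month + i - 1) % 12 + 1
--             year = start_year + (start_month + i - 1) // 12
--             dates.append(f"{year}-{month:02d}-01")  # YYYY-mm-DD format
--         elif periodicity == 4:  # Quarterly
--             month = (start_month + (i * 3) - 1) % 12 + 1
--             year = start_year + (start_month + (i * 3) - 1) // 12
--             dates.append(f"{year}-{month:02d}-01")  # YYYY-mm-DD format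
--     return dates
-- ===== SOURCE B (Python) =====
-- def generate_dates(start_year, start_month, num_values, periodicity):
--     if periodicity == 12:
--         step = 1
--     elif periodicity == 4:
--         step = 3
--     else:
--         return []
--     carry, m0 = divmod(start_month - 1, 12)
--     year, month = start_year + carry, m0 + 1
--     dates = []
--     for _ in range(num_values):
--         dates.append(f"{year}-{month:02d}-01")
--         month += step
--         if month > 12:
--             month -= 12
--             year += 1
--     return dates
-- ===== Notes on version B (the rewrite author's own statement) =====
-- stated objective: simpler
-- what changed: B lifts the periodicity branch out of the loop into a single month-step, normalizes (year, month) once with divmod, and then advances a running (year, month) accumulator with an explicit carry instead of recomputing each date from its index with // and % inside the loop.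
import Mathlib
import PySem

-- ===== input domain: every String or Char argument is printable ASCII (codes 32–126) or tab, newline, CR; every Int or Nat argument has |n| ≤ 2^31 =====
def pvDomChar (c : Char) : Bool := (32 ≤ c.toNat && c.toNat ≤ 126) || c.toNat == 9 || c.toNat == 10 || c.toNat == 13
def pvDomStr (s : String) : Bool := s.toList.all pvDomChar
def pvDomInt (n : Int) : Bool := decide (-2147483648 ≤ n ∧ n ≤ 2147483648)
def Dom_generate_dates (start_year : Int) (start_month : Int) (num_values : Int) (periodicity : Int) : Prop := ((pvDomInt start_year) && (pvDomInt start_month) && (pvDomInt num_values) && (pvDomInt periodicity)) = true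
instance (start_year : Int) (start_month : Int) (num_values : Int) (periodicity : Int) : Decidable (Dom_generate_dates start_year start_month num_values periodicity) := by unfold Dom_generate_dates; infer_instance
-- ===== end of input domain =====

-- B normalizes (year, month) once with divmod and then advances a running (year, month)
-- accumulator by a fixed month step, instead of recomputing each index by modular arithmetic;
-- objective: simpler (periodicity branch lifted out of the loop, no per-index //, %).

-- ===== PORT A =====
-- shared rendering of the f-string f"{year}-{month:02d}-01" (identical in both sources)
def pad2 (s : String) : String := if s.toList.length < 2 then "0" ++ s else s

def fmtDate (year month : Int) : String :=
  PySem.Int.toStr year ++ "-" ++ pad2 (PySem.Int.toStr month) ++ "-01"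

def generate_dates (start_year : Int) (start_month : Int) (num_values : Int) (periodicity : Int) : List String :=
  (PySem.List.pyRange 0 num_values 1).foldl (fun dates i =>
    if periodicity = 12 then
      dates ++ [fmtDate (start_year + PySem.Int.floordiv (start_month + i - 1) 12)
                        (PySem.Int.mod (start_month + i - 1) 12 + 1)]
    else if periodicity = 4 then
      dates ++ [fmtDate (start_year + PySem.Int.floordiv (start_month + i * 3 - 1) 12)
                        (PySem.Int.mod (start_month + i * 3 - 1) 12 + 1)]
    else dates) []

-- ===== PORT B =====
def altLoop : Nat → Int → Int → Int → List String → List String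
  | 0, _, _, _, dates => dates
  | n + 1, step, year, month, dates =>
    let dates' := dates ++ [fmtDate year month]
    let month' := month + step
    if month' > 12 then altLoop n step (year + 1) (month' - 12) dates'
    else altLoop n step year month' dates'

def generate_dates_alt (start_year : Int) (start_month : Int) (num_values : Int) (periodicity : Int) : List String :=
  if periodicity = 12 then
    altLoop num_values.toNat 1
      (start_year + PySem.Int.floordiv (start_month - 1) 12)
      (PySem.Int.mod (start_month - 1) 12 + 1) []
  else if periodicity = 4 then
    altLoop num_values.toNat 3
      (start_year + PySem.Int.floordiv (start_month - 1) 12)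
      (PySem.Int.mod (start_month - 1) 12 + 1) []
  else []

-- ===== PRECONDITION & SPEC =====
def Spec_generate_dates (start_year : Int) (start_month : Int) (num_values : Int) (periodicity : Int) (out : List String) : Prop := out = generate_dates_alt start_year start_month num_values periodicity
instance (start_year : Int) (start_month : Int) (num_values : Int) (periodicity : Int) (out : List String) : Decidable (Spec_generate_dates start_year start_month num_values periodicity out) := by unfold Spec_generate_dates; infer_instance

-- ===== CLAIM (what is proved, stated in full; the proofs are below) =====
def Claim_equal_generate_dates : Prop := ∀ (start_year : Int) (start_month : Int) (num_values : Int) (periodicity : Int), Dom_generate_dates start_year start_month num_values periodicity → Spec_generate_dates start_year start_month num_values periodicity (generate_dates start_year start_month num_values periodicity)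

-- ===== LEMMAS AND PROOFS =====

-- abstract entry: the date rendered from a total month count t (months since year 0)
def entryOf (t : Int) : String :=
  fmtDate (PySem.Int.floordiv t 12) (PySem.Int.mod t 12 + 1)

theorem entryOf_eq (y m : Int) (h1 : 1 ≤ m) (h2 : m ≤ 12) :
    entryOf (12 * y + m - 1) = fmtDate y m := by
  unfold entryOf
  rw [PySem.Int.floordiv_eq_ediv_of_pos (by norm_num),
      PySem.Int.mod_eq_emod_of_pos (by norm_num)]
  have hd : (12 * y + m - 1) / 12 = y := by omega
  have hm : (12 * y + m - 1) % 12 + 1 = m := by omega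
  rw [hd, hm]

theorem foldl_push (f : Int → String) :
    ∀ (l : List Int) (acc : List String),
      l.foldl (fun a x => a ++ [f x]) acc = acc ++ l.map f := by
  intro l
  induction l with
  | nil => intro acc; simp
  | cons x xs ih => intro acc; simp [List.foldl_cons, ih]

theorem foldl_skip : ∀ (l : List Int) (acc : List String),
    l.foldl (fun (a : List String) (_ : Int) => a) acc = acc := by
  intro l
  induction l with
  | nil => intro acc; rfl
  | cons x xs ih => intro acc; simp [List.foldl_cons, ih]

theorem altLoop_eq (step : Int) (hs1 : 1 ≤ step) (hs2 : step ≤ 12) :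
    ∀ (n : Nat) (y m t : Int) (acc : List String), 1 ≤ m → m ≤ 12 →
      t = 12 * y + m - 1 →
      altLoop n step y m acc = acc ++ (List.range n).map (fun k : Nat => entryOf (t + step * (k : Int))) := by
  intro n
  induction n with
  | zero => intro y m t acc _ _ _; simp [altLoop]
  | succ n ih =>
    intro y m t acc h1 h2 ht
    have hmap : (List.range (n + 1)).map (fun k : Nat => entryOf (t + step * k))
        = fmtDate y m :: (List.range n).map (fun k : Nat => entryOf ((t + step) + step * k)) := by
      rw [List.range_succ_eq_map]
      simp only [List.map_cons, List.map_map, Function.comp_def, Nat.cast_zero, mul_zero,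
        add_zero]
      refine congrArg₂ List.cons ?_ ?_
      · rw [ht]; exact entryOf_eq y m h1 h2
      · apply List.map_congr_left; intro k _; congr 1; push_cast; ring
    unfold altLoop
    by_cases hc : m + step > 12
    · rw [if_pos hc, ih (y + 1) (m + step - 12) (t + step) _ (by omega) (by omega) (by omega),
        hmap]
      simp only [List.append_assoc, List.singleton_append]
    · rw [if_neg hc, ih y (m + step) (t + step) _ (by omega) (by omega) (by omega), hmap]
      simp only [List.append_assoc, List.singleton_append]

theorem alt_init (start_year start_month : Int) :
    12 * (start_year + PySem.Int.floordiv (start_month - 1) 12)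
      + (PySem.Int.mod (start_month - 1) 12 + 1) - 1 = 12 * start_year + start_month - 1 := by
  rw [PySem.Int.floordiv_eq_ediv_of_pos (by norm_num),
      PySem.Int.mod_eq_emod_of_pos (by norm_num)]
  omega

theorem alt_m_bounds (start_month : Int) :
    1 ≤ PySem.Int.mod (start_month - 1) 12 + 1 ∧ PySem.Int.mod (start_month - 1) 12 + 1 ≤ 12 := by
  rw [PySem.Int.mod_eq_emod_of_pos (by norm_num)]
  omega

theorem a_entry (start_year start_month c : Int) :
    fmtDate (start_year + PySem.Int.floordiv (start_month + c - 1) 12)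
            (PySem.Int.mod (start_month + c - 1) 12 + 1)
      = entryOf (12 * start_year + start_month - 1 + c) := by
  unfold entryOf
  rw [PySem.Int.floordiv_eq_ediv_of_pos (by norm_num),
      PySem.Int.mod_eq_emod_of_pos (by norm_num),
      PySem.Int.floordiv_eq_ediv_of_pos (by norm_num),
      PySem.Int.mod_eq_emod_of_pos (by norm_num)]
  have hd : start_year + (start_month + c - 1) / 12 = (12 * start_year + start_month - 1 + c) / 12 := by
    omega
  have hm : (start_month + c - 1) % 12 = (12 * start_year + start_month - 1 + c) % 12 := by
    omega
  rw [hd, hm]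

theorem pyRange_toRange (n : Int) :
    PySem.List.pyRange 0 n 1 = List.map (fun k : Nat => (k : Int)) (List.range n.toNat) := by
  rw [PySem.List.pyRange_one]
  simp only [sub_zero, zero_add]

-- ===== VERDICT (by name: the statement is the Claim_ definition above) =====
theorem generate_dates_spec : Claim_equal_generate_dates := by
  intro sy sm nv p _
  unfold Spec_generate_dates generate_dates generate_dates_alt
  obtain ⟨hb1, hb2⟩ := alt_m_bounds sm
  by_cases h12 : p = 12
  · simp only [h12, if_true]
    rw [altLoop_eq 1 (by norm_num) (by norm_num) nv.toNat _ _ (12 * sy + sm - 1) [] hb1 hb2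
          (by have := alt_init sy sm; omega)]
    rw [pyRange_toRange]
    rw [foldl_push (fun i => fmtDate (sy + PySem.Int.floordiv (sm + i - 1) 12)
                                     (PySem.Int.mod (sm + i - 1) 12 + 1))]
    simp only [List.map_map, Function.comp_def, List.nil_append]
    apply List.map_congr_left
    intro k _
    rw [a_entry sy sm (k : Int)]
    congr 1; ring
  · by_cases h4 : p = 4
    · simp only [h4, show ((4:Int) = 12) = False from by norm_num, if_true, if_false]
      rw [altLoop_eq 3 (by norm_num) (by norm_num) nv.toNat _ _ (12 * sy + sm - 1) [] hb1 hb2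
            (by have := alt_init sy sm; omega)]
      rw [pyRange_toRange]
      rw [foldl_push (fun i => fmtDate (sy + PySem.Int.floordiv (sm + i * 3 - 1) 12)
                                       (PySem.Int.mod (sm + i * 3 - 1) 12 + 1))]
      simp only [List.map_map, Function.comp_def, List.nil_append]
      apply List.map_congr_left
      intro k _
      rw [a_entry sy sm ((k : Int) * 3)]
      congr 1; ring
    · simp only [if_neg h12, if_neg h4]
      exact foldl_skip _ []
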